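-- pv_equiv track=rewrite | github.com/brendenrossin/SecondBrain | src/secondbrain/scripts/inbox_processor.py | _ensure_task_hierarchy
-- ===== SOURCE A (Python) =====
-- def _ensure_task_hierarchy(content: str, category: str, sub_project: str, task_line: str) -> str:
--     """Ensure ### category and #### sub_project exist under ## Tasks, then append task."""
--     lines = content.split("\n")
--     tasks_idx = None
--     cat_idx = None
--     sub_idx = None
--     tasks_end = len(lines)
--
--     # Find ## Tasks section
--     for i, ln in enumerate(lines):
--         if ln.strip() == "## Tasks":
--             tasks_idx = i
--             for j in range(i + 1, len(lines)):
--                 if lines[j].strip().startswith("## ") and not lines[j].strip().startswith("### "):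
--                     tasks_end = j
--                     break
--             break
--
--     if tasks_idx is None:
--         lines.append("")
--         lines.append("## Tasks")
--         lines.append(f"### {category}")
--         lines.append(f"#### {sub_project}")
--         lines.append(task_line)
--         return "\n".join(lines)
--
--     # Find ### category within Tasks section
--     for i in range(tasks_idx + 1, tasks_end):
--         if lines[i].strip() == f"### {category}":
--             cat_idx = i
--             break
--
--     if cat_idx is None:
--         # Insert category at end of Tasks section
--         lines.insert(tasks_end, f"### {category}")
--         lines.insert(tasks_end + 1, f"#### {sub_project}")
--         lines.insert(tasks_end + 2, task_line)
--         return "\n".join(lines)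
--
--     # Find #### sub_project under this category
--     cat_end = tasks_end
--     for i in range(cat_idx + 1, tasks_end):
--         if lines[i].strip().startswith("### "):
--             cat_end = i
--             break
--
--     for i in range(cat_idx + 1, cat_end):
--         if lines[i].strip() == f"#### {sub_project}":
--             sub_idx = i
--             break
--
--     if sub_idx is None:
--         lines.insert(cat_end, f"#### {sub_project}")
--         lines.insert(cat_end + 1, task_line)
--         return "\n".join(lines)
--
--     # Find end of sub_project section
--     sub_end = cat_end
--     for i in range(sub_idx + 1, cat_end):
--         if lines[i].strip().startswith("#### ") or lines[i].strip().startswith("### "):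
--             sub_end = i
--             break
--
--     lines.insert(sub_end, task_line)
--     return "\n".join(lines)
-- ===== SOURCE B (Python) =====
-- def _ensure_task_hierarchy(content: str, category: str, sub_project: str, task_line: str) -> str:
--     """Table-driven rewrite: one pass collects (index, level, text) for every markdown
--     heading; all section boundaries are then derived from that table and the result is
--     rebuilt by list slicing instead of repeated scans and in-place inserts."""
--     lines = content.split("\n")
--     n = len(lines)
--     heads = []
--     for i, ln in enumerate(lines):
--         s = ln.strip()
--         if s.startswith("## ") and not s.startswith("### "):
--             heads.append((i, 2, s))
--         elif s.startswith("### ") and not s.startswith("#### "):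
--             heads.append((i, 3, s))
--         elif s.startswith("#### "):
--             heads.append((i, 4, s))
--
--     tasks_idx = next((i for i, l, s in heads if l == 2 and s == "## Tasks"), None)
--     if tasks_idx is None:
--         return "\n".join(lines + ["", "## Tasks", f"### {category}", f"#### {sub_project}", task_line])
--
--     tasks_end = next((i for i, l, s in heads if l == 2 and tasks_idx < i), n)
--
--     cat_idx = next((i for i, l, s in heads
--                     if l == 3 and tasks_idx < i < tasks_end and s == f"### {category}"), None)
--     if cat_idx is None:
--         return "\n".join(lines[:tasks_end] + [f"### {category}", f"#### {sub_project}", task_line] + lines[tasks_end:])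
--
--     cat_end = next((i for i, l, s in heads if l == 3 and cat_idx < i < tasks_end), tasks_end)
--
--     sub_idx = next((i for i, l, s in heads
--                     if l == 4 and cat_idx < i < cat_end and s == f"#### {sub_project}"), None)
--     if sub_idx is None:
--         return "\n".join(lines[:cat_end] + [f"#### {sub_project}", task_line] + lines[cat_end:])
--
--     sub_end = next((i for i, l, s in heads if l in (3, 4) and sub_idx < i < cat_end), cat_end)
--     return "\n".join(lines[:sub_end] + [task_line] + lines[sub_end:])
-- ===== Notes on version B (the rewrite author's own statement) =====
-- stated objective: alternative
-- what changed: B scans the document once to build a table of (index, level, text) heading records and derives every section boundary (Tasks block, category, sub_project and their ends) from that table, rebuilding the result by list slicing, instead of A's nested re-scans over line ranges with in-place inserts.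
import Mathlib
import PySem

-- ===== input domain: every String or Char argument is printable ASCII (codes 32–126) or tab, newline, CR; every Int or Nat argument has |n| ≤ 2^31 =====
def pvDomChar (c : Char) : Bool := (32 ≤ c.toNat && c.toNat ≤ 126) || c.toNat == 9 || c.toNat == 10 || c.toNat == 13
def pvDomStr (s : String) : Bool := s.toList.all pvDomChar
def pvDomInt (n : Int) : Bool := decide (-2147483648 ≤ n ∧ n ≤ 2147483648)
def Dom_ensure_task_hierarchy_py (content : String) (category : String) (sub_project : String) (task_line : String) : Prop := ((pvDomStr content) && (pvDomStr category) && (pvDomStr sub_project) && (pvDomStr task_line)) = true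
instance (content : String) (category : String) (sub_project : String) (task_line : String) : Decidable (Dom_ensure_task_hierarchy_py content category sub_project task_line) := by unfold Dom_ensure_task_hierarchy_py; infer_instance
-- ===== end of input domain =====

-- B replaces A's nested range re-scans with one classification pass building a heading
-- table (index, level, text), derives all section boundaries from that table, and
-- rebuilds the result by slicing; equal return value on every input (alternative, not faster).

-- ===== PORT A =====
-- for i, ln in enumerate(lines): if ln.strip() == "## Tasks": tasks_idx = i; break
def pvA_tasksLoop : List String → Nat → Option Nat
  | [], _ => none
  | ln :: rest, i =>
      if PySem.Str.strip ln == "## Tasks" then some i else pvA_tasksLoop rest (i + 1)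

-- for j in range(i+1, len(lines)): if strip startswith "## " and not "### ": tasks_end = j; break
def pvA_endLoop : List String → Nat → Nat → Nat
  | [], _, d => d
  | ln :: rest, j, d =>
      if PySem.Str.startswith (PySem.Str.strip ln) "## "
          && !(PySem.Str.startswith (PySem.Str.strip ln) "### ")
      then j else pvA_endLoop rest (j + 1) d

-- for i in range(a, b): if lines[i].strip() == target: idx = i; break   (run on the slice)
def pvA_eqLoop : List String → Nat → String → Option Nat
  | [], _, _ => none
  | ln :: rest, i, target =>
      if PySem.Str.strip ln == target then some i else pvA_eqLoop rest (i + 1) target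

-- for i in range(a, b): if strip startswith "### ": cat_end = i; break
def pvA_l3Loop : List String → Nat → Nat → Nat
  | [], _, d => d
  | ln :: rest, i, d =>
      if PySem.Str.startswith (PySem.Str.strip ln) "### " then i else pvA_l3Loop rest (i + 1) d

-- for i in range(a, b): if strip startswith "#### " or "### ": sub_end = i; break
def pvA_subEndLoop : List String → Nat → Nat → Nat
  | [], _, d => d
  | ln :: rest, i, d =>
      if PySem.Str.startswith (PySem.Str.strip ln) "#### "
          || PySem.Str.startswith (PySem.Str.strip ln) "### "
      then i else pvA_subEndLoop rest (i + 1) d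

def ensure_task_hierarchy_py (content : String) (category : String) (sub_project : String) (task_line : String) : String :=
  let lines := (PySem.Str.split? content "\n").getD []  -- sep "\n" ≠ "", so split? is always some
  match pvA_tasksLoop lines 0 with
  | none =>
      PySem.Str.join "\n" (lines ++ ["", "## Tasks", "### " ++ category, "#### " ++ sub_project, task_line])
  | some t =>
      let te := pvA_endLoop (lines.drop (t + 1)) (t + 1) lines.length
      match pvA_eqLoop ((lines.drop (t + 1)).take (te - (t + 1))) (t + 1) ("### " ++ category) with
      | none =>
          let l1 := PySem.List.insert lines (te : Int) ("### " ++ category)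
          let l2 := PySem.List.insert l1 ((te : Int) + 1) ("#### " ++ sub_project)
          let l3 := PySem.List.insert l2 ((te : Int) + 2) task_line
          PySem.Str.join "\n" l3
      | some c =>
          let ce := pvA_l3Loop ((lines.drop (c + 1)).take (te - (c + 1))) (c + 1) te
          match pvA_eqLoop ((lines.drop (c + 1)).take (ce - (c + 1))) (c + 1) ("#### " ++ sub_project) with
          | none =>
              let l1 := PySem.List.insert lines (ce : Int) ("#### " ++ sub_project)
              let l2 := PySem.List.insert l1 ((ce : Int) + 1) task_line
              PySem.Str.join "\n" l2
          | some si =>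
              let se := pvA_subEndLoop ((lines.drop (si + 1)).take (ce - (si + 1))) (si + 1) ce
              PySem.Str.join "\n" (PySem.List.insert lines (se : Int) task_line)

-- ===== PORT B =====
-- classify a line: Some (level, stripped text) for '## '/'### '/'#### ' headings
def pvB_classify (ln : String) : Option (Nat × String) :=
  let s := PySem.Str.strip ln
  if PySem.Str.startswith s "## " && !(PySem.Str.startswith s "### ") then some (2, s)
  else if PySem.Str.startswith s "### " && !(PySem.Str.startswith s "#### ") then some (3, s)
  else if PySem.Str.startswith s "#### " then some (4, s)
  else none

-- the single pass building the heading table [(index, level, text), ...]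
def pvB_headsLoop : List String → Nat → List (Nat × Nat × String)
  | [], _ => []
  | ln :: rest, i =>
      match pvB_classify ln with
      | some q => (i, q.1, q.2) :: pvB_headsLoop rest (i + 1)
      | none => pvB_headsLoop rest (i + 1)

def ensure_task_hierarchy_py_alt (content : String) (category : String) (sub_project : String) (task_line : String) : String :=
  let lines := (PySem.Str.split? content "\n").getD []  -- sep "\n" ≠ "", so split? is always some
  let n := lines.length
  let heads := pvB_headsLoop lines 0
  match (heads.find? (fun h => h.2.1 == 2 && h.2.2 == "## Tasks")).map (·.1) with
  | none =>
      PySem.Str.join "\n" (lines ++ ["", "## Tasks", "### " ++ category, "#### " ++ sub_project, task_line])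
  | some t =>
      let te := ((heads.find? (fun h => h.2.1 == 2 && decide (t < h.1))).map (·.1)).getD n
      match (heads.find? (fun h => (h.2.1 == 3 && h.2.2 == ("### " ++ category)) && decide (t < h.1) && decide (h.1 < te))).map (·.1) with
      | none =>
          PySem.Str.join "\n" (lines.take te ++ ["### " ++ category, "#### " ++ sub_project, task_line] ++ lines.drop te)
      | some c =>
          let ce := ((heads.find? (fun h => h.2.1 == 3 && decide (c < h.1) && decide (h.1 < te))).map (·.1)).getD te
          match (heads.find? (fun h => (h.2.1 == 4 && h.2.2 == ("#### " ++ sub_project)) && decide (c < h.1) && decide (h.1 < ce))).map (·.1) with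
          | none =>
              PySem.Str.join "\n" (lines.take ce ++ ["#### " ++ sub_project, task_line] ++ lines.drop ce)
          | some si =>
              let se := ((heads.find? (fun h => (h.2.1 == 3 || h.2.1 == 4) && decide (si < h.1) && decide (h.1 < ce))).map (·.1)).getD ce
              PySem.Str.join "\n" (lines.take se ++ [task_line] ++ lines.drop se)

-- ===== PRECONDITION & SPEC =====
def Spec_ensure_task_hierarchy_py (content : String) (category : String) (sub_project : String) (task_line : String) (out : String) : Prop := out = ensure_task_hierarchy_py_alt content category sub_project task_line
instance (content : String) (category : String) (sub_project : String) (task_line : String) (out : String) : Decidable (Spec_ensure_task_hierarchy_py content category sub_project task_line out) := by unfold Spec_ensure_task_hierarchy_py; infer_instance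

-- ===== CLAIM (what is proved, stated in full; the proofs are below) =====
def Claim_equal_ensure_task_hierarchy_py : Prop := ∀ (content : String) (category : String) (sub_project : String) (task_line : String), Dom_ensure_task_hierarchy_py content category sub_project task_line → Spec_ensure_task_hierarchy_py content category sub_project task_line (ensure_task_hierarchy_py content category sub_project task_line)

-- ===== LEMMAS AND PROOFS =====

-- ---- string-prefix exclusivity facts ----
theorem pv_sw3_not_sw2 (s : String) (h : PySem.Str.startswith s "### " = true) :
    PySem.Str.startswith s "## " = false := by
  simp only [PySem.Str.startswith_eq] at *
  rw [PySem.Chars.startswith_iff] at h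
  obtain ⟨t, ht⟩ := h
  rw [Bool.eq_false_iff]
  intro hc
  rw [PySem.Chars.startswith_iff] at hc
  rw [← ht] at hc
  simp [List.cons_prefix_cons] at hc

theorem pv_sw4_not_sw3 (s : String) (h : PySem.Str.startswith s "#### " = true) :
    PySem.Str.startswith s "### " = false := by
  simp only [PySem.Str.startswith_eq] at *
  rw [PySem.Chars.startswith_iff] at h
  obtain ⟨t, ht⟩ := h
  rw [Bool.eq_false_iff]
  intro hc
  rw [PySem.Chars.startswith_iff] at hc
  rw [← ht] at hc
  simp [List.cons_prefix_cons] at hc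

theorem pv_sw4_not_sw2 (s : String) (h : PySem.Str.startswith s "#### " = true) :
    PySem.Str.startswith s "## " = false := by
  simp only [PySem.Str.startswith_eq] at *
  rw [PySem.Chars.startswith_iff] at h
  obtain ⟨t, ht⟩ := h
  rw [Bool.eq_false_iff]
  intro hc
  rw [PySem.Chars.startswith_iff] at hc
  rw [← ht] at hc
  simp [List.cons_prefix_cons] at hc

theorem pv_sw_cat3 (c : String) : PySem.Str.startswith ("### " ++ c) "### " = true := by
  simp only [PySem.Str.startswith_eq, String.toList_append]
  rw [PySem.Chars.startswith_iff]
  exact List.prefix_append _ _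

theorem pv_sw_sub4 (c : String) : PySem.Str.startswith ("#### " ++ c) "#### " = true := by
  simp only [PySem.Str.startswith_eq, String.toList_append]
  rw [PySem.Chars.startswith_iff]
  exact List.prefix_append _ _

-- ---- bounds of the A-side scans ----
theorem pvA_tasksLoop_bound (ls : List String) (i t : Nat) (h : pvA_tasksLoop ls i = some t) :
    i ≤ t ∧ t < i + ls.length := by
  induction ls generalizing i with
  | nil => simp [pvA_tasksLoop] at h
  | cons ln rest ih =>
    rw [pvA_tasksLoop] at h
    split at h
    · injection h with h'; subst h'; simp only [List.length_cons]; omega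
    · have := ih (i + 1) h
      simp only [List.length_cons]
      omega

theorem pvA_eqLoop_bound (ls : List String) (i c : Nat) (tgt : String)
    (h : pvA_eqLoop ls i tgt = some c) : i ≤ c ∧ c < i + ls.length := by
  induction ls generalizing i with
  | nil => simp [pvA_eqLoop] at h
  | cons ln rest ih =>
    rw [pvA_eqLoop] at h
    split at h
    · injection h with h'; subst h'; simp only [List.length_cons]; omega
    · have := ih (i + 1) h
      simp only [List.length_cons]
      omega

theorem pvA_endLoop_bound (ls : List String) (j d : Nat) :
    pvA_endLoop ls j d = d ∨ (j ≤ pvA_endLoop ls j d ∧ pvA_endLoop ls j d < j + ls.length) := by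
  induction ls generalizing j with
  | nil => simp [pvA_endLoop]
  | cons ln rest ih =>
    rw [pvA_endLoop]
    split
    · right; simp
    · rcases ih (j + 1) with h | h
      · left; exact h
      · right; simp only [List.length_cons]; omega

theorem pvA_l3Loop_bound (ls : List String) (j d : Nat) :
    pvA_l3Loop ls j d = d ∨ (j ≤ pvA_l3Loop ls j d ∧ pvA_l3Loop ls j d < j + ls.length) := by
  induction ls generalizing j with
  | nil => simp [pvA_l3Loop]
  | cons ln rest ih =>
    rw [pvA_l3Loop]
    split
    · right; simp
    · rcases ih (j + 1) with h | h
      · left; exact h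
      · right; simp only [List.length_cons]; omega

-- ---- structure of the heading table ----
theorem pvB_headsLoop_append (a b : List String) (i : Nat) :
    pvB_headsLoop (a ++ b) i = pvB_headsLoop a i ++ pvB_headsLoop b (i + a.length) := by
  induction a generalizing i with
  | nil => simp [pvB_headsLoop]
  | cons ln rest ih =>
    simp only [List.cons_append, pvB_headsLoop]
    cases pvB_classify ln with
    | none => rw [ih]; simp only [List.length_cons]; ring_nf
    | some q => rw [ih]; simp only [List.length_cons, List.cons_append]; ring_nf

theorem pvB_headsLoop_idx (ls : List String) (i : Nat) :
    ∀ h ∈ pvB_headsLoop ls i, i ≤ h.1 ∧ h.1 < i + ls.length := by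
  induction ls generalizing i with
  | nil => simp [pvB_headsLoop]
  | cons ln rest ih =>
    intro h hm
    rw [pvB_headsLoop] at hm
    simp only [List.length_cons]
    cases hc : pvB_classify ln with
    | none =>
      rw [hc] at hm
      have := ih (i + 1) h hm
      omega
    | some q =>
      rw [hc] at hm
      rcases List.mem_cons.mp hm with h1 | h1
      · subst h1; simp
      · have := ih (i + 1) h h1
        omega

theorem pv_find?_ext {α : Type} (l : List α) (p q : α → Bool)
    (h : ∀ x ∈ l, p x = q x) : l.find? p = l.find? q := by
  induction l with
  | nil => rfl
  | cons x xs ih =>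
    simp only [List.find?_cons]
    rw [h x (List.mem_cons_self ..)]
    cases q x
    · exact ih fun y hy => h y (List.mem_cons_of_mem _ hy)
    · rfl

-- restrict a bounded find? over the whole table to the table of the slice [a, b)
theorem pv_seg (lines : List String) (a b : Nat) (p : Nat × Nat × String → Bool)
    (qb : Nat × String → Bool) (hab : a ≤ b) (hbn : b ≤ lines.length)
    (hlow : ∀ h ∈ pvB_headsLoop lines 0, p h = true → a ≤ h.1)
    (hhigh : ∀ h ∈ pvB_headsLoop lines 0, p h = true → h.1 < b)
    (hmid : ∀ h ∈ pvB_headsLoop lines 0, a ≤ h.1 → h.1 < b → p h = qb h.2) :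
    ((pvB_headsLoop lines 0).find? p).map (·.1)
      = ((pvB_headsLoop ((lines.drop a).take (b - a)) a).find? (fun h => qb h.2)).map (·.1) := by
  have hsplit : lines = lines.take a ++ ((lines.drop a).take (b - a) ++ lines.drop b) := by
    have h1 : lines.drop b = ((lines.drop a).drop (b - a)) := by
      rw [List.drop_drop]
      congr 1
      omega
    rw [h1, List.take_append_drop, List.take_append_drop]
  have hta : (lines.take a).length = a := by simp; omega
  have hseg : ((lines.drop a).take (b - a)).length = b - a := by simp; omega
  have hheads : pvB_headsLoop lines 0
      = pvB_headsLoop (lines.take a) 0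
        ++ (pvB_headsLoop ((lines.drop a).take (b - a)) a
        ++ pvB_headsLoop (lines.drop b) b) := by
    conv_lhs => rw [hsplit]
    rw [pvB_headsLoop_append, pvB_headsLoop_append, hta, hseg]
    have e1 : 0 + a = a := by omega
    rw [e1]
    have e2 : a + (b - a) = b := by omega
    rw [e2]
  rw [hheads, List.find?_append, List.find?_append]
  have hm1 : (pvB_headsLoop (lines.take a) 0).find? p = none := by
    rw [List.find?_eq_none]
    intro x hx hpx
    have hb := pvB_headsLoop_idx (lines.take a) 0 x hx
    have hmem : x ∈ pvB_headsLoop lines 0 := by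
      rw [hheads]; exact List.mem_append_left _ hx
    have := hlow x hmem hpx
    omega
  have hm3 : (pvB_headsLoop (lines.drop b) b).find? p = none := by
    rw [List.find?_eq_none]
    intro x hx hpx
    have hb := pvB_headsLoop_idx (lines.drop b) b x hx
    have hmem : x ∈ pvB_headsLoop lines 0 := by
      rw [hheads]
      exact List.mem_append_right _ (List.mem_append_right _ hx)
    have := hhigh x hmem hpx
    omega
  rw [hm1, hm3]
  have hm2 : (pvB_headsLoop ((lines.drop a).take (b - a)) a).find? p
      = (pvB_headsLoop ((lines.drop a).take (b - a)) a).find? (fun h => qb h.2) := by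
    apply pv_find?_ext
    intro x hx
    have hb := pvB_headsLoop_idx ((lines.drop a).take (b - a)) a x hx
    have hmem : x ∈ pvB_headsLoop lines 0 := by
      rw [hheads]
      exact List.mem_append_right _ (List.mem_append_left _ hx)
    exact hmid x hmem (by omega) (by rw [hseg] at hb; omega)
  rw [hm2]
  cases (pvB_headsLoop ((lines.drop a).take (b - a)) a).find? (fun h => qb h.2) <;> rfl


-- a beq with the target is impossible when a prefix test disagrees with the target's
theorem pv_beq_false_of_sw (s tgt pfx : String)
    (hf : PySem.Str.startswith s pfx = false)
    (ht : PySem.Str.startswith tgt pfx = true) : (s == tgt) = false := by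
  rw [Bool.eq_false_iff]
  intro hq
  rw [eq_of_beq hq] at hf
  rw [hf] at ht
  exact Bool.false_ne_true ht

-- full case analysis of the classifier, with the prefix tests it decides
theorem pv_classify_inv (ln : String) :
    (pvB_classify ln = some (2, PySem.Str.strip ln)
      ∧ PySem.Str.startswith (PySem.Str.strip ln) "## " = true
      ∧ PySem.Str.startswith (PySem.Str.strip ln) "### " = false
      ∧ PySem.Str.startswith (PySem.Str.strip ln) "#### " = false)
  ∨ (pvB_classify ln = some (3, PySem.Str.strip ln)
      ∧ PySem.Str.startswith (PySem.Str.strip ln) "### " = true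
      ∧ PySem.Str.startswith (PySem.Str.strip ln) "## " = false
      ∧ PySem.Str.startswith (PySem.Str.strip ln) "#### " = false)
  ∨ (pvB_classify ln = some (4, PySem.Str.strip ln)
      ∧ PySem.Str.startswith (PySem.Str.strip ln) "#### " = true
      ∧ PySem.Str.startswith (PySem.Str.strip ln) "## " = false
      ∧ PySem.Str.startswith (PySem.Str.strip ln) "### " = false)
  ∨ (pvB_classify ln = none
      ∧ PySem.Str.startswith (PySem.Str.strip ln) "## " = false
      ∧ PySem.Str.startswith (PySem.Str.strip ln) "### " = false
      ∧ PySem.Str.startswith (PySem.Str.strip ln) "#### " = false) := by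
  unfold pvB_classify
  dsimp only
  split_ifs with h1 h2 h3
  · left
    simp only [Bool.and_eq_true, Bool.not_eq_true'] at h1
    refine ⟨rfl, h1.1, h1.2, ?_⟩
    rw [Bool.eq_false_iff]
    intro h4
    rw [pv_sw4_not_sw2 _ h4] at h1
    exact absurd h1.1 (by simp)
  · right; left
    simp only [Bool.and_eq_true, Bool.not_eq_true'] at h2
    exact ⟨rfl, h2.1, pv_sw3_not_sw2 _ h2.1, h2.2⟩
  · right; right; left
    exact ⟨rfl, h3, pv_sw4_not_sw2 _ h3, pv_sw4_not_sw3 _ h3⟩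
  · right; right; right
    simp only [Bool.and_eq_true, Bool.not_eq_true', not_and, Bool.not_eq_false] at h1 h2
    have hsw4 : PySem.Str.startswith (PySem.Str.strip ln) "#### " = false := by
      simpa using h3
    have hsw3 : PySem.Str.startswith (PySem.Str.strip ln) "### " = false := by
      rcases Bool.eq_false_or_eq_true (PySem.Str.startswith (PySem.Str.strip ln) "### ") with h | h
      · have h' := h2 h
        rw [hsw4] at h'
        exact absurd h' Bool.false_ne_true
      · exact h
    have hsw2 : PySem.Str.startswith (PySem.Str.strip ln) "## " = false := by
      rcases Bool.eq_false_or_eq_true (PySem.Str.startswith (PySem.Str.strip ln) "## ") with h | h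
      · have h' := h1 h
        rw [hsw3] at h'
        exact absurd h' Bool.false_ne_true
      · exact h
    exact ⟨rfl, hsw2, hsw3, hsw4⟩

-- ---- the six scan correspondences ----
theorem pv_corr_tasks (ls : List String) (i : Nat) :
    ((pvB_headsLoop ls i).find? (fun h => h.2.1 == 2 && h.2.2 == "## Tasks")).map (·.1)
      = pvA_tasksLoop ls i := by
  induction ls generalizing i with
  | nil => rfl
  | cons ln rest ih =>
    rw [pvB_headsLoop, pvA_tasksLoop]
    rcases pv_classify_inv ln with ⟨hc, hs2, hs3, hs4⟩ | ⟨hc, hs3, hs2, hs4⟩ | ⟨hc, hs4, hs2, hs3⟩ | ⟨hc, hs2, hs3, hs4⟩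
    · rw [hc]
      simp only [List.find?_cons]
      by_cases hb : (PySem.Str.strip ln == "## Tasks") = true
      · simp [hb]
      · rw [Bool.not_eq_true] at hb
        simp only [hb, Bool.and_false]
        rw [if_neg (by simp [hb])]
        simpa using ih (i+1)
    · rw [hc]
      have hb := pv_beq_false_of_sw _ "## Tasks" "## " hs2 (by decide)
      simp only [List.find?_cons, hb]
      rw [if_neg (by simp [hb])]
      simpa using ih (i+1)
    · rw [hc]
      have hb := pv_beq_false_of_sw _ "## Tasks" "## " hs2 (by decide)
      simp only [List.find?_cons]
      rw [if_neg (by simp [hb])]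
      simpa using ih (i+1)
    · rw [hc]
      have hb := pv_beq_false_of_sw _ "## Tasks" "## " hs2 (by decide)
      rw [if_neg (by simp [hb])]
      exact ih (i+1)

theorem pv_corr_end (ls : List String) (i d : Nat) :
    (((pvB_headsLoop ls i).find? (fun h => h.2.1 == 2)).map (·.1)).getD d
      = pvA_endLoop ls i d := by
  induction ls generalizing i with
  | nil => rfl
  | cons ln rest ih =>
    rw [pvB_headsLoop, pvA_endLoop]
    rcases pv_classify_inv ln with ⟨hc, hs2, hs3, hs4⟩ | ⟨hc, hs3, hs2, hs4⟩ | ⟨hc, hs4, hs2, hs3⟩ | ⟨hc, hs2, hs3, hs4⟩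
    · rw [hc, if_pos (by rw [hs2, hs3]; rfl)]
      simp [List.find?_cons]
    · rw [hc, if_neg (by rw [hs2]; simp)]
      simp only [List.find?_cons]
      simpa using ih (i+1)
    · rw [hc, if_neg (by rw [hs2]; simp)]
      simp only [List.find?_cons]
      simpa using ih (i+1)
    · rw [hc, if_neg (by rw [hs2]; simp)]
      exact ih (i+1)

theorem pv_corr_cat (ls : List String) (i : Nat) (c : String) :
    ((pvB_headsLoop ls i).find? (fun h => h.2.1 == 3 && h.2.2 == ("### " ++ c))).map (·.1)
      = pvA_eqLoop ls i ("### " ++ c) := by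
  induction ls generalizing i with
  | nil => rfl
  | cons ln rest ih =>
    rw [pvB_headsLoop, pvA_eqLoop]
    rcases pv_classify_inv ln with ⟨hc, hs2, hs3, hs4⟩ | ⟨hc, hs3, hs2, hs4⟩ | ⟨hc, hs4, hs2, hs3⟩ | ⟨hc, hs2, hs3, hs4⟩
    · rw [hc]
      have hb := pv_beq_false_of_sw _ ("### " ++ c) "### " hs3 (pv_sw_cat3 c)
      simp only [List.find?_cons, hb]
      rw [if_neg (by simp [hb])]
      simpa using ih (i+1)
    · rw [hc]
      simp only [List.find?_cons]
      by_cases hb : (PySem.Str.strip ln == "### " ++ c) = true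
      · simp [hb]
      · rw [Bool.not_eq_true] at hb
        simp only [hb, Bool.and_false]
        rw [if_neg (by simp [hb])]
        simpa using ih (i+1)
    · rw [hc]
      have hb := pv_beq_false_of_sw _ ("### " ++ c) "### " hs3 (pv_sw_cat3 c)
      simp only [List.find?_cons]
      rw [if_neg (by simp [hb])]
      simpa using ih (i+1)
    · rw [hc]
      have hb := pv_beq_false_of_sw _ ("### " ++ c) "### " hs3 (pv_sw_cat3 c)
      rw [if_neg (by simp [hb])]
      exact ih (i+1)

theorem pv_corr_sub (ls : List String) (i : Nat) (c : String) :
    ((pvB_headsLoop ls i).find? (fun h => h.2.1 == 4 && h.2.2 == ("#### " ++ c))).map (·.1)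
      = pvA_eqLoop ls i ("#### " ++ c) := by
  induction ls generalizing i with
  | nil => rfl
  | cons ln rest ih =>
    rw [pvB_headsLoop, pvA_eqLoop]
    rcases pv_classify_inv ln with ⟨hc, hs2, hs3, hs4⟩ | ⟨hc, hs3, hs2, hs4⟩ | ⟨hc, hs4, hs2, hs3⟩ | ⟨hc, hs2, hs3, hs4⟩
    · rw [hc]
      have hb := pv_beq_false_of_sw _ ("#### " ++ c) "#### " hs4 (pv_sw_sub4 c)
      simp only [List.find?_cons, hb]
      rw [if_neg (by simp [hb])]
      simpa using ih (i+1)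
    · rw [hc]
      have hb := pv_beq_false_of_sw _ ("#### " ++ c) "#### " hs4 (pv_sw_sub4 c)
      simp only [List.find?_cons]
      rw [if_neg (by simp [hb])]
      simpa using ih (i+1)
    · rw [hc]
      simp only [List.find?_cons]
      by_cases hb : (PySem.Str.strip ln == "#### " ++ c) = true
      · simp [hb]
      · rw [Bool.not_eq_true] at hb
        simp only [hb, Bool.and_false]
        rw [if_neg (by simp [hb])]
        simpa using ih (i+1)
    · rw [hc]
      have hb := pv_beq_false_of_sw _ ("#### " ++ c) "#### " hs4 (pv_sw_sub4 c)
      rw [if_neg (by simp [hb])]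
      exact ih (i+1)

theorem pv_corr_l3 (ls : List String) (i d : Nat) :
    (((pvB_headsLoop ls i).find? (fun h => h.2.1 == 3)).map (·.1)).getD d
      = pvA_l3Loop ls i d := by
  induction ls generalizing i with
  | nil => rfl
  | cons ln rest ih =>
    rw [pvB_headsLoop, pvA_l3Loop]
    rcases pv_classify_inv ln with ⟨hc, hs2, hs3, hs4⟩ | ⟨hc, hs3, hs2, hs4⟩ | ⟨hc, hs4, hs2, hs3⟩ | ⟨hc, hs2, hs3, hs4⟩
    · rw [hc, if_neg (by rw [hs3]; simp)]
      simp only [List.find?_cons]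
      simpa using ih (i+1)
    · rw [hc, if_pos (by rw [hs3])]
      simp [List.find?_cons]
    · rw [hc, if_neg (by rw [hs3]; simp)]
      simp only [List.find?_cons]
      simpa using ih (i+1)
    · rw [hc, if_neg (by rw [hs3]; simp)]
      exact ih (i+1)

theorem pv_corr_subEnd (ls : List String) (i d : Nat) :
    (((pvB_headsLoop ls i).find? (fun h => h.2.1 == 3 || h.2.1 == 4)).map (·.1)).getD d
      = pvA_subEndLoop ls i d := by
  induction ls generalizing i with
  | nil => rfl
  | cons ln rest ih =>
    rw [pvB_headsLoop, pvA_subEndLoop]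
    rcases pv_classify_inv ln with ⟨hc, hs2, hs3, hs4⟩ | ⟨hc, hs3, hs2, hs4⟩ | ⟨hc, hs4, hs2, hs3⟩ | ⟨hc, hs2, hs3, hs4⟩
    · rw [hc, if_neg (by rw [hs3, hs4]; simp)]
      simp only [List.find?_cons]
      simpa using ih (i+1)
    · rw [hc, if_pos (by rw [hs3]; simp)]
      simp [List.find?_cons]
    · rw [hc, if_pos (by rw [hs4]; simp)]
      simp [List.find?_cons]
    · rw [hc, if_neg (by rw [hs3, hs4]; simp)]
      exact ih (i+1)

-- ---- Python list.insert at an in-range position is slicing ----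
theorem pv_insert1 (lines : List String) (k : Nat) (x : String) (hk : k ≤ lines.length) :
    PySem.List.insert lines (k : Int) x = lines.take k ++ [x] ++ lines.drop k := by
  rw [PySem.List.insert_natCast lines k x hk]
  simp

theorem pv_insert2 (lines : List String) (k : Nat) (x y : String) (hk : k ≤ lines.length) :
    PySem.List.insert (PySem.List.insert lines (k : Int) x) ((k : Int) + 1) y
      = lines.take k ++ [x, y] ++ lines.drop k := by
  rw [pv_insert1 _ _ _ hk]
  have hc : ((k : Int) + 1) = (((k + 1 : Nat)) : Int) := by push_cast; ring
  rw [hc, PySem.List.insert_natCast _ _ _ (by simp; omega)]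
  have hlt : (lines.take k).length = k := by simp; omega
  rw [List.append_assoc, List.take_append, List.drop_append, hlt]
  have e1 : List.take (k + 1) (List.take k lines) = List.take k lines :=
    List.take_of_length_le (by rw [hlt]; omega)
  have e2 : List.drop (k + 1) (List.take k lines) = ([] : List String) :=
    List.drop_of_length_le (by rw [hlt]; omega)
  rw [e1, e2]
  have e3 : k + 1 - k = 1 := by omega
  rw [e3]
  simp

theorem pv_insert3 (lines : List String) (k : Nat) (x y z : String) (hk : k ≤ lines.length) :
    PySem.List.insert (PySem.List.insert (PySem.List.insert lines (k : Int) x) ((k : Int) + 1) y) ((k : Int) + 2) z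
      = lines.take k ++ [x, y, z] ++ lines.drop k := by
  rw [pv_insert2 _ _ _ _ hk]
  have hc : ((k : Int) + 2) = (((k + 2 : Nat)) : Int) := by push_cast; ring
  rw [hc, PySem.List.insert_natCast _ _ _ (by simp; omega)]
  have hlt : (lines.take k).length = k := by simp; omega
  rw [List.append_assoc, List.take_append, List.drop_append, hlt]
  have e1 : List.take (k + 2) (List.take k lines) = List.take k lines :=
    List.take_of_length_le (by rw [hlt]; omega)
  have e2 : List.drop (k + 2) (List.take k lines) = ([] : List String) :=
    List.drop_of_length_le (by rw [hlt]; omega)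
  rw [e1, e2]
  have e3 : k + 2 - k = 2 := by omega
  rw [e3]
  simp

-- ===== VERDICT (by name: the statement is the Claim_ definition above) =====
-- one more bound fact, stated here with the other proof-only lemmas
theorem pvA_subEndLoop_bound (ls : List String) (j d : Nat) :
    pvA_subEndLoop ls j d = d ∨ (j ≤ pvA_subEndLoop ls j d ∧ pvA_subEndLoop ls j d < j + ls.length) := by
  induction ls generalizing j with
  | nil => simp [pvA_subEndLoop]
  | cons ln rest ih =>
    rw [pvA_subEndLoop]
    split
    · right; simp
    · rcases ih (j + 1) with h | h
      · left; exact h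
      · right; simp only [List.length_cons]; omega

theorem ensure_task_hierarchy_py_spec : Claim_equal_ensure_task_hierarchy_py := by
  intro content category sub_project task_line _
  unfold Spec_ensure_task_hierarchy_py
  simp only [ensure_task_hierarchy_py, ensure_task_hierarchy_py_alt]
  generalize (PySem.Str.split? content "\n").getD [] = lines
  have hIdx := pvB_headsLoop_idx lines 0
  rw [pv_corr_tasks lines 0]
  cases hT : pvA_tasksLoop lines 0 with
  | none => rfl
  | some t =>
    dsimp only
    have htb := pvA_tasksLoop_bound lines 0 t hT
    have ht1 : t + 1 ≤ lines.length := by omega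
    -- the Tasks-section end
    have hseg1 : (lines.drop (t + 1)).take (lines.length - (t + 1)) = lines.drop (t + 1) :=
      List.take_of_length_le (by simp)
    have hTE : (((pvB_headsLoop lines 0).find? (fun h => h.2.1 == 2 && decide (t < h.1))).map (·.1)).getD lines.length
        = pvA_endLoop (lines.drop (t + 1)) (t + 1) lines.length := by
      rw [pv_seg lines (t + 1) lines.length _ (fun q => q.1 == 2) ht1 (le_refl _)
        (fun x hx hpx => by
          simp only [Bool.and_eq_true, decide_eq_true_eq] at hpx
          omega)
        (fun x hx hpx => by
          have := (hIdx x hx).2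
          omega)
        (fun x hx h1 h2 => by
          rw [decide_eq_true (show t < x.1 by omega), Bool.and_true])]
      rw [hseg1]
      exact pv_corr_end (lines.drop (t + 1)) (t + 1) lines.length
    rw [hTE]
    have hEB := pvA_endLoop_bound (lines.drop (t + 1)) (t + 1) lines.length
    have hDL : (lines.drop (t + 1)).length = lines.length - (t + 1) := by simp
    set teA := pvA_endLoop (lines.drop (t + 1)) (t + 1) lines.length with hteN
    have hte1 : t + 1 ≤ teA := by rcases hEB with h | h <;> omega
    have hte2 : teA ≤ lines.length := by rcases hEB with h | h <;> omega
    -- the category search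
    have hCAT : ((pvB_headsLoop lines 0).find? (fun h => (h.2.1 == 3 && h.2.2 == ("### " ++ category)) && decide (t < h.1) && decide (h.1 < teA))).map (·.1)
        = pvA_eqLoop ((lines.drop (t + 1)).take (teA - (t + 1))) (t + 1) ("### " ++ category) := by
      rw [pv_seg lines (t + 1) teA _ (fun q => q.1 == 3 && q.2 == ("### " ++ category)) hte1 hte2
        (fun x hx hpx => by
          simp only [Bool.and_eq_true, decide_eq_true_eq] at hpx
          omega)
        (fun x hx hpx => by
          simp only [Bool.and_eq_true, decide_eq_true_eq] at hpx
          omega)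
        (fun x hx h1 h2 => by
          rw [decide_eq_true (show t < x.1 by omega), decide_eq_true (show x.1 < teA by omega),
            Bool.and_true, Bool.and_true])]
      exact pv_corr_cat _ _ _
    rw [hCAT]
    cases hC : pvA_eqLoop ((lines.drop (t + 1)).take (teA - (t + 1))) (t + 1) ("### " ++ category) with
    | none =>
      dsimp only
      rw [pv_insert3 lines teA ("### " ++ category) ("#### " ++ sub_project) task_line hte2]
    | some c =>
      dsimp only
      have hCB := pvA_eqLoop_bound _ _ _ _ hC
      have hSL : ((lines.drop (t + 1)).take (teA - (t + 1))).length = teA - (t + 1) := by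
        simp
        omega
      have hc1 : t + 1 ≤ c := hCB.1
      have hc2 : c < teA := by omega
      -- the category-section end
      have hCE : (((pvB_headsLoop lines 0).find? (fun h => h.2.1 == 3 && decide (c < h.1) && decide (h.1 < teA))).map (·.1)).getD teA
          = pvA_l3Loop ((lines.drop (c + 1)).take (teA - (c + 1))) (c + 1) teA := by
        rw [pv_seg lines (c + 1) teA _ (fun q => q.1 == 3) (by omega) hte2
          (fun x hx hpx => by
            simp only [Bool.and_eq_true, decide_eq_true_eq] at hpx
            omega)
          (fun x hx hpx => by
            simp only [Bool.and_eq_true, decide_eq_true_eq] at hpx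
            omega)
          (fun x hx h1 h2 => by
            rw [decide_eq_true (show c < x.1 by omega), decide_eq_true (show x.1 < teA by omega),
              Bool.and_true, Bool.and_true])]
        exact pv_corr_l3 _ _ _
      rw [hCE]
      have hLB := pvA_l3Loop_bound ((lines.drop (c + 1)).take (teA - (c + 1))) (c + 1) teA
      have hDL2 : ((lines.drop (c + 1)).take (teA - (c + 1))).length = teA - (c + 1) := by
        simp
        omega
      set ceA := pvA_l3Loop ((lines.drop (c + 1)).take (teA - (c + 1))) (c + 1) teA with hceN
      have hce1 : c + 1 ≤ ceA := by rcases hLB with h | h <;> omega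
      have hce2 : ceA ≤ teA := by rcases hLB with h | h <;> omega
      have hce3 : ceA ≤ lines.length := by omega
      -- the sub-project search
      have hSUB : ((pvB_headsLoop lines 0).find? (fun h => (h.2.1 == 4 && h.2.2 == ("#### " ++ sub_project)) && decide (c < h.1) && decide (h.1 < ceA))).map (·.1)
          = pvA_eqLoop ((lines.drop (c + 1)).take (ceA - (c + 1))) (c + 1) ("#### " ++ sub_project) := by
        rw [pv_seg lines (c + 1) ceA _ (fun q => q.1 == 4 && q.2 == ("#### " ++ sub_project)) (by omega) hce3
          (fun x hx hpx => by
            simp only [Bool.and_eq_true, decide_eq_true_eq] at hpx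
            omega)
          (fun x hx hpx => by
            simp only [Bool.and_eq_true, decide_eq_true_eq] at hpx
            omega)
          (fun x hx h1 h2 => by
            rw [decide_eq_true (show c < x.1 by omega), decide_eq_true (show x.1 < ceA by omega),
              Bool.and_true, Bool.and_true])]
        exact pv_corr_sub _ _ _
      rw [hSUB]
      cases hS : pvA_eqLoop ((lines.drop (c + 1)).take (ceA - (c + 1))) (c + 1) ("#### " ++ sub_project) with
      | none =>
        dsimp only
        rw [pv_insert2 lines ceA ("#### " ++ sub_project) task_line hce3]
      | some si =>
        dsimp only
        have hSB := pvA_eqLoop_bound _ _ _ _ hS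
        have hDL3 : ((lines.drop (c + 1)).take (ceA - (c + 1))).length = ceA - (c + 1) := by
          simp
          omega
        have hsi1 : c + 1 ≤ si := hSB.1
        have hsi2 : si < ceA := by omega
        -- the sub-project-section end
        have hSE : (((pvB_headsLoop lines 0).find? (fun h => (h.2.1 == 3 || h.2.1 == 4) && decide (si < h.1) && decide (h.1 < ceA))).map (·.1)).getD ceA
            = pvA_subEndLoop ((lines.drop (si + 1)).take (ceA - (si + 1))) (si + 1) ceA := by
          rw [pv_seg lines (si + 1) ceA _ (fun q => q.1 == 3 || q.1 == 4) (by omega) hce3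
            (fun x hx hpx => by
              simp only [Bool.and_eq_true, decide_eq_true_eq] at hpx
              omega)
            (fun x hx hpx => by
              simp only [Bool.and_eq_true, decide_eq_true_eq] at hpx
              omega)
            (fun x hx h1 h2 => by
              rw [decide_eq_true (show si < x.1 by omega), decide_eq_true (show x.1 < ceA by omega),
                Bool.and_true, Bool.and_true])]
          exact pv_corr_subEnd _ _ _
        rw [hSE]
        have hYB := pvA_subEndLoop_bound ((lines.drop (si + 1)).take (ceA - (si + 1))) (si + 1) ceA
        have hDL4 : ((lines.drop (si + 1)).take (ceA - (si + 1))).length = ceA - (si + 1) := by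
          simp
          omega
        set seA := pvA_subEndLoop ((lines.drop (si + 1)).take (ceA - (si + 1))) (si + 1) ceA with hseN
        have hse2 : seA ≤ lines.length := by rcases hYB with h | h <;> omega
        rw [pv_insert1 lines seA task_line hse2]
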